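-- pv_equiv track=rewrite | github.com/tindo2003/socket_prog | array/exodus.py | check_permutations
-- ===== SOURCE A (Python) =====
-- def check_permutations(p):
--     """
--     p is a list of integers from 0 to n-1, where n is the length of p.
--     """
--     n = len(p)
--     # keep track of indices of all elements in p
--     indices = [0] * (n + 1)
--     for i in range(n):
--         indices[p[i]] = i + 1
--
--     res = ["0"] * n
--     min_idex = indices[1]
--     max_index = indices[1]
--     res[0] = "1"
--     for k in range(2, n + 1):
--         min_idex = min(min_idex, indices[k])
--         max_index = max(max_index, indices[k])
--         length_of_block = max_index - min_idex + 1
--         if length_of_block == k: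
--             res[k - 1] = "1"
--         else:
--             res[k - 1] = "0"
--     return "".join(res)
-- ===== SOURCE B (Python) =====
-- def check_permutations(p):
--     """
--     p is a list of integers from 0 to n-1, where n is the length of p.
--     """
--     n = len(p)
--     indices = [0] * (n + 1)
--     for i, v in enumerate(p):
--         indices[v] = i + 1
--     pos = indices[1:]
--     return "".join(
--         "1" if max(pos[:k]) - min(pos[:k]) + 1 == k else "0"
--         for k in range(1, n + 1)
--     )
-- ===== Notes on version B (the rewrite author's own statement) =====
-- stated objective: simpler
-- what changed: Replaces A's stateful single pass that threads running min/max scalars and mutates a preallocated result array with a stateless per-prefix brute force: for each k it recomputes min and max of the fresh slice pos[:k] with the builtins and emits the bit in a join over a generator.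
import Mathlib
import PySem

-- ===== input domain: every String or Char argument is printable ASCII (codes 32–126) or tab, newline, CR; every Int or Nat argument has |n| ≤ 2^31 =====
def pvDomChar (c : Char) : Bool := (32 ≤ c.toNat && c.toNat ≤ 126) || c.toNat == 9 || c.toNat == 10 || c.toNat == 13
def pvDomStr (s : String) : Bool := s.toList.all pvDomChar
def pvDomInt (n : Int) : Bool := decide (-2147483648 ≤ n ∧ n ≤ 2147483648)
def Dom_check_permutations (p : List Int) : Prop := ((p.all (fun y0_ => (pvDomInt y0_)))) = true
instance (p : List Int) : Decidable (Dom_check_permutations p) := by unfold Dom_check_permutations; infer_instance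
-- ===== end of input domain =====

-- B replaces A's stateful running-min/max pass that mutates a preallocated result array by a
-- stateless per-prefix brute force: for each k it recomputes min/max of the fresh slice pos[:k]
-- (objective: simpler; B is quadratic where A is linear — no speed claim).


-- ===== PORT A =====
def check_permutations (p : List Int) : String :=
  let n : Nat := p.length
  -- indices = [0] * (n + 1);  for i in range(n): indices[p[i]] = i + 1
  let indices : List Int := (PySem.List.pyRange 0 (n : Int) 1).foldl
      (fun ind i => PySem.List.pySetD ind (PySem.List.pyGetD p i 0) (i + 1))
      (List.replicate (n + 1) 0)
  -- res = ["0"] * n;  min_idex = max_index = indices[1];  res[0] = "1"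
  let res : List String := List.replicate n "0"
  let mn : Int := PySem.List.pyGetD indices 1 0
  let mx : Int := PySem.List.pyGetD indices 1 0
  let res := PySem.List.pySetD res 0 "1"
  -- for k in range(2, n + 1): running min/max, write res[k-1] in place
  let st := (PySem.List.pyRange 2 ((n : Int) + 1) 1).foldl
      (fun (st : Int × Int × List String) k =>
        let mn := min st.1 (PySem.List.pyGetD indices k 0)
        let mx := max st.2.1 (PySem.List.pyGetD indices k 0)
        (mn, mx, PySem.List.pySetD st.2.2 (k - 1) (if mx - mn + 1 = k then "1" else "0")))
      (mn, mx, res)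
  PySem.Str.join "" st.2.2

-- ===== PORT B =====
def check_permutations_alt (p : List Int) : String :=
  let n : Nat := p.length
  let indices : List Int := (PySem.List.enumerate p).foldl
      (fun ind iv => PySem.List.pySetD ind iv.2 (iv.1 + 1))
      (List.replicate (n + 1) 0)
  let pos := PySem.List.slice indices (some 1) none
  PySem.Str.join "" ((PySem.List.pyRange 1 ((n : Int) + 1) 1).map
    (fun k =>
      let block := PySem.List.slice pos none (some k)
      -- max(block)/min(block): block is nonempty for every k the range yields (1 ≤ k ≤ n),
      -- so Python's ValueError branch is unreachable; the none arm is never taken there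
      match PySem.List.max? block (fun x => x), PySem.List.min? block (fun x => x) with
      | some mx, some mn => if mx - mn + 1 = k then "1" else "0"
      | _, _ => "0"))

-- ===== PRECONDITION & SPEC =====
-- Pre_ excludes exactly the inputs where Python A raises IndexError: the empty list (A reads
-- entry 1 of the indices table before its loop) and lists containing a value v outside the
-- Python index range -(n+1) … n of the (n+1)-element indices table (the write at v raises).
def Pre_check_permutations (p : List Int) : Prop :=
  p ≠ [] ∧ ∀ v ∈ p, -((p.length : Int) + 1) ≤ v ∧ v ≤ (p.length : Int)
instance (p : List Int) : Decidable (Pre_check_permutations p) := by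
  unfold Pre_check_permutations; infer_instance

def pvWitness_check_permutations : List Int := [2, 1, 3]

def Spec_check_permutations (p : List Int) (out : String) : Prop := out = check_permutations_alt p
instance (p : List Int) (out : String) : Decidable (Spec_check_permutations p out) := by
  unfold Spec_check_permutations; infer_instance

-- ===== CLAIM (what is proved, stated in full; the proofs are below) =====
def Claim_equal_check_permutations : Prop := ∀ (p : List Int), Dom_check_permutations p → Pre_check_permutations p → Spec_check_permutations p (check_permutations p)

-- ===== LEMMAS AND PROOFS =====

-- prefix minimum / maximum of `a :: t` over the first k+1 elements, and the common answer list
def pvPm (a : Int) (t : List Int) (k : Nat) : Int := (t.take k).foldl min a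
def pvPx (a : Int) (t : List Int) (k : Nat) : Int := (t.take k).foldl max a
def pvModel (a : Int) (t : List Int) : List String :=
  (List.range (t.length + 1)).map
    (fun k => if pvPx a t k - pvPm a t k = (k : Int) then "1" else "0")

theorem pvModel_length (a : Int) (t : List Int) : (pvModel a t).length = t.length + 1 := by
  simp [pvModel]

theorem pvModel_take_one (a : Int) (t : List Int) : (pvModel a t).take 1 = ["1"] := by
  simp [pvModel, ← List.map_take, List.take_range, pvPm, pvPx]

theorem pvModel_getElem (a : Int) (t : List Int) (k : Nat) (hk : k < t.length + 1) :
    (pvModel a t)[k]'(by simpa [pvModel_length] using hk)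
      = if pvPx a t k - pvPm a t k = (k : Int) then "1" else "0" := by
  simp [pvModel]

-- the indices table both ports build (the same fold, reached through range vs enumerate)
def pvIdx (p : List Int) : List Int :=
  (PySem.List.pyRange 0 (p.length : Int) 1).foldl
    (fun ind i => PySem.List.pySetD ind (PySem.List.pyGetD p i 0) (i + 1))
    (List.replicate (p.length + 1) 0)

theorem pvIdx_alt (p : List Int) :
    (PySem.List.enumerate p).foldl
      (fun ind iv => PySem.List.pySetD ind iv.2 (iv.1 + 1))
      (List.replicate (p.length + 1) (0 : Int)) = pvIdx p := by
  rw [PySem.List.enumerate_eq_map_pyRange p 0, List.foldl_map]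
  simp [pvIdx]

theorem length_foldl_pySetD {β : Type} (l : List β) (f : β → Int) (g : β → Int) :
    ∀ (init : List Int),
      (l.foldl (fun ind x => PySem.List.pySetD ind (f x) (g x)) init).length = init.length := by
  induction l with
  | nil => intro init; rfl
  | cons x xs ih => intro init; simp [List.foldl_cons, ih, PySem.List.length_pySetD]

theorem pvIdx_length (p : List Int) : (pvIdx p).length = p.length + 1 := by
  unfold pvIdx
  rw [length_foldl_pySetD (PySem.List.pyRange 0 (p.length : Int) 1)
        (fun i => PySem.List.pyGetD p i 0) (fun i => i + 1)]
  simp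

-- prefix-min/max step
theorem pvPm_succ (a : Int) (t : List Int) (m : Nat) (hm : m < t.length) :
    pvPm a t (m + 1) = min (pvPm a t m) t[m] := by
  unfold pvPm
  rw [List.take_add_one, List.getElem?_eq_getElem hm, List.foldl_append]
  rfl
theorem pvPx_succ (a : Int) (t : List Int) (m : Nat) (hm : m < t.length) :
    pvPx a t (m + 1) = max (pvPx a t m) t[m] := by
  unfold pvPx
  rw [List.take_add_one, List.getElem?_eq_getElem hm, List.foldl_append]
  rfl

-- A-side loop invariant
theorem A_loop_inv (p : List Int) (i0 a : Int) (t : List Int)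
    (hI : pvIdx p = i0 :: a :: t) :
    ∀ (m : Nat), m ≤ t.length →
      (((List.range m).map (fun (j : Nat) => (2 : Int) + (j : Int))).foldl
        (fun (st : Int × Int × List String) k =>
          (min st.1 (PySem.List.pyGetD (pvIdx p) k 0),
           max st.2.1 (PySem.List.pyGetD (pvIdx p) k 0),
           PySem.List.pySetD st.2.2 (k - 1)
             (if max st.2.1 (PySem.List.pyGetD (pvIdx p) k 0)
                   - min st.1 (PySem.List.pyGetD (pvIdx p) k 0) + 1 = k then "1" else "0")))
        (a, a, "1" :: List.replicate t.length "0"))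
      = (pvPm a t m, pvPx a t m,
         (pvModel a t).take (m + 1) ++ List.replicate (t.length - m) "0") := by
  intro m
  induction m with
  | zero => intro _; simp [pvPm, pvPx, pvModel_take_one]
  | succ m ih =>
    intro hm
    have hm' : m < t.length := by omega
    rw [List.range_succ, List.map_append, List.foldl_append, ih (by omega)]
    simp only [List.map_cons, List.map_nil, List.foldl_cons, List.foldl_nil]
    have hget : PySem.List.pyGetD (pvIdx p) (2 + (m : Int)) 0 = t[m] := by
      have : (2 : Int) + (m : Int) = ((m + 2 : Nat) : Int) := by push_cast; ring
      rw [this, PySem.List.pyGetD_ofNat (pvIdx p) (m + 2) 0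
            (by rw [hI]; simpa using hm')]
      simp [hI]
    rw [hget, ← pvPm_succ a t m hm', ← pvPx_succ a t m hm']
    refine Prod.ext rfl (Prod.ext rfl ?_)
    have hidx : (2 : Int) + (m : Int) - 1 = ((m + 1 : Nat) : Int) := by push_cast; ring
    rw [hidx, PySem.List.pySetD_natCast]
    have hlen : ((pvModel a t).take (m + 1)).length = m + 1 := by
      rw [List.length_take, pvModel_length]; omega
    have hrep : List.replicate (t.length - m) "0"
        = "0" :: List.replicate (t.length - (m + 1)) "0" := by
      have : t.length - m = (t.length - (m + 1)) + 1 := by omega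
      rw [this, List.replicate_succ]
    have hcond : (pvPx a t (m + 1) - pvPm a t (m + 1) + 1 = 2 + (m : Int))
        = (pvPx a t (m + 1) - pvPm a t (m + 1) = ((m + 1 : Nat) : Int)) := by
      apply propext; constructor <;> intro h <;> push_cast at h ⊢ <;> omega
    rw [hrep]; simp only [hcond]
    rw [show ((pvModel a t).take (m + 1) ++ "0" :: List.replicate (t.length - (m + 1)) "0").set
          (m + 1) (if pvPx a t (m + 1) - pvPm a t (m + 1) = ((m + 1 : Nat) : Int) then "1" else "0")
        = (pvModel a t).take (m + 1)
          ++ (if pvPx a t (m + 1) - pvPm a t (m + 1) = ((m + 1 : Nat) : Int) then "1" else "0")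
             :: List.replicate (t.length - (m + 1)) "0" from by
      rw [List.set_append_right _ _ (by omega)]
      simp [hlen]]
    rw [← pvModel_getElem a t (m + 1) (by omega)]
    have hmem : m + 1 < (pvModel a t).length := by rw [pvModel_length]; omega
    have htake : List.take (m + 1 + 1) (pvModel a t)
        = List.take (m + 1) (pvModel a t) ++ [(pvModel a t)[m + 1]] := by
      rw [List.take_add_one, List.getElem?_eq_getElem hmem]; rfl
    rw [htake, List.append_assoc]
    rfl

theorem pvIdx_def (p : List Int) :
    (PySem.List.pyRange 0 (p.length : Int) 1).foldl
      (fun ind i => PySem.List.pySetD ind (PySem.List.pyGetD p i 0) (i + 1))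
      (List.replicate (p.length + 1) 0) = pvIdx p := rfl

theorem A_eq_model (p : List Int) (i0 a : Int) (t : List Int)
    (hI : pvIdx p = i0 :: a :: t) (hlen : p.length = t.length + 1) :
    check_permutations p = PySem.Str.join "" (pvModel a t) := by
  simp only [check_permutations, pvIdx_def]
  have h1 : PySem.List.pyGetD (pvIdx p) 1 0 = a := by rw [hI]; simp [pysem]
  have hres : PySem.List.pySetD (List.replicate p.length "0") 0 "1"
      = "1" :: List.replicate t.length "0" := by
    rw [hlen]; simp [pysem, List.replicate_succ]
  have hrange : PySem.List.pyRange 2 ((p.length : Int) + 1) 1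
      = (List.range t.length).map (fun (j : Nat) => (2 : Int) + (j : Int)) := by
    have h2 : ((p.length : Int) + 1 - 2).toNat = t.length := by
      rw [hlen]; push_cast; omega
    rw [PySem.List.pyRange_one, h2]
  rw [h1, hres, hrange]
  exact (congrArg (fun s : Int × Int × List String => PySem.Str.join "" s.2.2)
      (A_loop_inv p i0 a t hI t.length (le_refl _))).trans
    (by simp [List.take_of_length_le (le_of_eq (pvModel_length a t))])

-- B-side: the per-prefix brute force computes the same bit list
theorem B_eq_model (p : List Int) (i0 a : Int) (t : List Int)
    (hI : pvIdx p = i0 :: a :: t) (hlen : p.length = t.length + 1) :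
    check_permutations_alt p = PySem.Str.join "" (pvModel a t) := by
  simp only [check_permutations_alt, pvIdx_alt]
  have hpos : PySem.List.slice (pvIdx p) (some 1) none = a :: t := by
    rw [PySem.List.slice_from (pvIdx p) (by norm_num), hI]; rfl
  rw [hpos]
  have hrange : PySem.List.pyRange 1 ((p.length : Int) + 1) 1
      = (List.range (t.length + 1)).map (fun (j : Nat) => (1 : Int) + (j : Nat)) := by
    have h2 : ((p.length : Int) + 1 - 1).toNat = t.length + 1 := by
      rw [hlen]; push_cast; omega
    rw [PySem.List.pyRange_one, h2]
  rw [hrange, List.map_map]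
  unfold pvModel
  congr 1
  apply List.map_congr_left
  intro j hj
  have hj' : j < t.length + 1 := List.mem_range.mp hj
  simp only [Function.comp]
  have hcast : (1 : Int) + (j : Nat) = ((j + 1 : Nat) : Int) := by push_cast; ring
  have hblock : PySem.List.slice (a :: t) none (some ((1 : Int) + (j : Nat)))
      = a :: t.take j := by
    rw [hcast, PySem.List.slice_to_natCast]
    rfl
  rw [hblock, PySem.List.max?_id_cons, PySem.List.min?_id_cons]
  have hcond : (t.take j).foldl max a - (t.take j).foldl min a + 1 = (1 : Int) + (j : Nat)
      ↔ pvPx a t j - pvPm a t j = (j : Int) := by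
    unfold pvPx pvPm; constructor <;> intro h <;> omega
  simp only [pvPx, pvPm]
  by_cases h : (t.take j).foldl max a - (t.take j).foldl min a = (j : Int)
  · rw [if_pos (by omega : (t.take j).foldl max a - (t.take j).foldl min a + 1 = (1:Int) + (j:Nat)), if_pos h]
  · rw [if_neg (by omega : ¬ (t.take j).foldl max a - (t.take j).foldl min a + 1 = (1:Int) + (j:Nat)), if_neg h]

-- ===== VERDICT (by name: the statement is the Claim_ definition above) =====
theorem check_permutations_spec : Claim_equal_check_permutations := by
  intro p _ hpre
  obtain ⟨hne, -⟩ := hpre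
  have hl := pvIdx_length p
  have hp : 1 ≤ p.length := by
    cases p with
    | nil => exact absurd rfl hne
    | cons x xs => simp
  cases eI : pvIdx p with
  | nil => rw [eI] at hl; simp at hl
  | cons i0 rest =>
    cases rest with
    | nil => rw [eI] at hl; simp only [List.length_cons, List.length_nil] at hl; omega
    | cons a t =>
      have hlen : p.length = t.length + 1 := by
        rw [eI] at hl; simp only [List.length_cons] at hl; omega
      show check_permutations p = check_permutations_alt p
      rw [A_eq_model p i0 a t eI hlen, B_eq_model p i0 a t eI hlen]
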